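-- pv_equiv track=rewrite | github.com/Edsel-Tan/dashboard | Solutions/882.py | est
-- ===== SOURCE A (Python) =====
-- def est(x):
--     c = 0
--     mc = 0
--     for i in bin(x)[2:][::-1]:
--         if i == '1':
--             c -= 1
--         else:
--             c += 1
--         mc = min(c, mc)
--     return -mc
-- ===== SOURCE B (Python) =====
-- def est(x):
--     # Recursive suffix formulation: m(s) = min over all prefixes (including
--     # the empty one) of the +/-1 prefix sums of s, defined by the recurrence
--     # m("") = 0, m(ch+rest) = min(0, step(ch) + m(rest)).  No running sum,
--     # no running minimum, no materialized prefix list.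
--     def m(s):
--         if not s:
--             return 0
--         v = -1 if s[0] == '1' else 1
--         return min(0, v + m(s[1:]))
--     return -m(bin(x)[2:][::-1])
-- ===== Notes on version B (the rewrite author's own statement) =====
-- stated objective: alternative
-- what changed: Replaces A's iterative loop carrying a running sum and a running minimum by a structural recursion on the digit string using the suffix recurrence m(ch+rest)=min(0, step(ch)+m(rest)), which computes the minimal prefix sum without any accumulator state.
import Mathlib
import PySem

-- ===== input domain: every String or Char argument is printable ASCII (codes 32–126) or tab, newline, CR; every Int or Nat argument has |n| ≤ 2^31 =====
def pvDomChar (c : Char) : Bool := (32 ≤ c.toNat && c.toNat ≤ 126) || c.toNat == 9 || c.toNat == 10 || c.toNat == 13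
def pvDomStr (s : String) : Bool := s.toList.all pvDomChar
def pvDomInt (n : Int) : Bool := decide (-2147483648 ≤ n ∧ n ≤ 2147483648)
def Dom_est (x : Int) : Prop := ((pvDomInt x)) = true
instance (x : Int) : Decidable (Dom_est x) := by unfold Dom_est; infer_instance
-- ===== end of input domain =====

-- B replaces A's running-sum+running-min loop by a structural recursion on the digit string (suffix recurrence min(0, step + m(rest))); alternative decomposition, same cost.


-- ===== PORT A =====
-- bin(x)[2:][::-1]
def estChars (x : Int) : List Char :=
  (PySem.List.slice (PySem.Int.toBinChars0b x) (some 2) none).reverse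

-- one iteration of A's loop: state (c, mc)
def estStep (st : Int × Int) (i : Char) : Int × Int :=
  let c := if i = '1' then st.1 - 1 else st.1 + 1
  (c, min c st.2)

def est (x : Int) : Int :=
  -((estChars x).foldl estStep (0, 0)).2

-- ===== PORT B =====
-- B's recursive helper m: m [] = 0, m (ch :: rest) = min 0 (step ch + m rest)
def estAltM : List Char → Int
  | [] => 0
  | ch :: rest => min 0 ((if ch = '1' then -1 else 1) + estAltM rest)

def est_alt (x : Int) : Int :=
  -(estAltM (estChars x))

-- ===== PRECONDITION & SPEC =====
def Spec_est (x : Int) (out : Int) : Prop := out = est_alt x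
instance (x : Int) (out : Int) : Decidable (Spec_est x out) := by unfold Spec_est; infer_instance

-- ===== CLAIM (what is proved, stated in full; the proofs are below) =====
def Claim_equal_est : Prop := ∀ (x : Int), Dom_est x → Spec_est x (est x)

-- ===== LEMMAS AND PROOFS =====

theorem estAltM_nonpos (s : List Char) : estAltM s ≤ 0 := by
  cases s with
  | nil => simp [estAltM]
  | cons ch rest => simp [estAltM]

theorem foldA_eq (s : List Char) : ∀ (c mc : Int), mc ≤ c →
    (s.foldl estStep (c, mc)).2 = min mc (c + estAltM s) := by
  induction s with
  | nil => intro c mc h; simp [estAltM]; omega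
  | cons ch rest ih =>
    intro c mc h
    have hM := estAltM_nonpos rest
    simp only [List.foldl_cons, estStep, estAltM]
    split
    · rw [ih (c - 1) (min (c - 1) mc) (by omega)]
      omega
    · rw [ih (c + 1) (min (c + 1) mc) (by omega)]
      omega

-- ===== VERDICT (by name: the statement is the Claim_ definition above) =====
theorem est_spec : Claim_equal_est := by
  intro x _
  unfold Spec_est est est_alt
  rw [foldA_eq _ 0 0 le_rfl]
  have := estAltM_nonpos (estChars x)
  omega
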